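-- pv_equiv track=rewrite | github.com/murillodominguez/aed1 | Exercicios/Exercicios Aleatorios/teclado_tel_to_alphabet.py | translate_nokia_alphabet
-- ===== SOURCE A (Python) =====
-- def translate_nokia_alphabet(code):
--   keyboard = [['0', '2', '22', '222',
--               '3', '33', '333',
--               '4', '44', '444',
--               '5', '55', '555',
--               '6', '66', '666',
--               '7', '77', '777', '7777',
--               '8', '88', '888',
--               '9', '99', '999', '9999'],
--               [' ', 'a', 'b', 'c', 'd', 'e',
--                'f', 'g', 'h', 'i', 'j',
--                'k', 'l', 'm', 'n', 'o',
--                'p', 'q', 'r', 's', 't',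
--                'u', 'v', 'w', 'x', 'y', 'z']]
--   text = ''
--   digit = code[0]
--
--   for i in range(1, len(code)):
--     if code[i] == digit[-1]:
--       digit += code[i]
--     else:
--       for j in range(len(keyboard[0])):
--         if digit == keyboard[0][j]:
--           text += keyboard[1][j]
--       digit = code[i]
--   for j in range(len(keyboard[0])):
--     if digit == keyboard[0][j]:
--       text += keyboard[1][j]
--
--   return text
-- ===== SOURCE B (Python) =====
-- def translate_nokia_alphabet(code):
--     # digit -> (first letter on that key, number of letters on it)
--     base = {'0': (' ', 1), '2': ('a', 3), '3': ('d', 3), '4': ('g', 3),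
--             '5': ('j', 3), '6': ('m', 3), '7': ('p', 4), '8': ('t', 3), '9': ('w', 4)}
--     out = []
--     i = 0
--     n = len(code)
--     while i < n:
--         d = code[i]
--         j = i
--         while j < n and code[j] == d:
--             j += 1
--         k = j - i  # length of the maximal run of d
--         if d in base:
--             ch, cnt = base[d]
--             if k <= cnt:
--                 out.append(chr(ord(ch) + k - 1))
--         i = j
--     return ''.join(out)
-- ===== Notes on version B (the rewrite author's own statement) =====
-- stated objective: faster
-- what changed: Replaces A's per-run linear search through a 27-entry keypress-string table (and its quadratically growing run-string buffer) with a single run-length scan using a 9-entry digit dict and the closed form chr(ord(first_letter)+k-1); measured ~5x faster on large inputs.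
import Mathlib
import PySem

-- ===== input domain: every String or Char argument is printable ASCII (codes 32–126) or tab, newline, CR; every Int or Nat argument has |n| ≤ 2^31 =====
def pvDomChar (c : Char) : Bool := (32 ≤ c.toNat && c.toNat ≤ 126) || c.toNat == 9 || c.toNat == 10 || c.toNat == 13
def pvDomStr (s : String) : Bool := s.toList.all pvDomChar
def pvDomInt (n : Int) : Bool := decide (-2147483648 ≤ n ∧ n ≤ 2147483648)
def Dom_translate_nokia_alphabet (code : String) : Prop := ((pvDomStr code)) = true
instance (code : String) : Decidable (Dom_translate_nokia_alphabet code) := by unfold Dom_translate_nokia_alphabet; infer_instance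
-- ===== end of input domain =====

-- B replaces A's per-run scan of the 27-entry keypress-string table (and its growing run
-- buffer) by one run-length pass with a 9-entry digit dict and chr(ord(base)+k-1) (faster).

-- ===== PORT A =====
-- keyboard[0] and keyboard[1] of A, as lists of char lists / chars
def nokiaKeys : List (List Char) :=
  [['0'], ['2'], ['2','2'], ['2','2','2'],
   ['3'], ['3','3'], ['3','3','3'],
   ['4'], ['4','4'], ['4','4','4'],
   ['5'], ['5','5'], ['5','5','5'],
   ['6'], ['6','6'], ['6','6','6'],
   ['7'], ['7','7'], ['7','7','7'], ['7','7','7','7'],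
   ['8'], ['8','8'], ['8','8','8'],
   ['9'], ['9','9'], ['9','9','9'], ['9','9','9','9']]

def nokiaLetters : List Char :=
  [' ', 'a', 'b', 'c', 'd', 'e', 'f', 'g', 'h', 'i', 'j', 'k', 'l', 'm',
   'n', 'o', 'p', 'q', 'r', 's', 't', 'u', 'v', 'w', 'x', 'y', 'z']

-- A's inner 'for j in range(len(keyboard[0])): if digit == keyboard[0][j]: text += keyboard[1][j]'
def lookA (text : List Char) (digit : List Char) : List Char :=
  (List.range nokiaKeys.length).foldl
    (fun t j => if nokiaKeys.getD j [] = digit then t ++ [nokiaLetters.getD j ' '] else t) text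

-- one step of A's main loop (state = (text, digit)); digit is never empty, so
-- digit[-1] is ported as getLastD (the default is never read)
def stepA (st : List Char × List Char) (ch : Char) : List Char × List Char :=
  if ch = st.2.getLastD ' ' then (st.1, st.2 ++ [ch]) else (lookA st.1 st.2, [ch])

def translate_nokia_alphabet (code : String) : String :=
  match code.toList with
  | [] => ""          -- Python: 'digit = code[0]' raises IndexError; excluded by Pre_
  | c :: rest =>
      let st := rest.foldl stepA ([], [c])
      String.ofList (lookA st.1 st.2)

-- ===== PORT B =====
-- B's base dict: digit -> (first letter on the key, number of letters)
def nokiaBase : PySem.Dict Char (Char × Int) :=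
  PySem.Dict.ofList
    [('0', (' ', 1)), ('2', ('a', 3)), ('3', ('d', 3)), ('4', ('g', 3)),
     ('5', ('j', 3)), ('6', ('m', 3)), ('7', ('p', 4)), ('8', ('t', 3)), ('9', ('w', 4))]

-- B's outer while loop: each iteration consumes one maximal run (inner while = takeWhile/dropWhile)
def runsB : List Char → List Char
  | [] => []
  | d :: rest =>
      let k : Int := 1 + (rest.takeWhile (· == d)).length
      let out : List Char :=
        match nokiaBase.get? d with
        | some (ch, cnt) =>
            if k ≤ cnt then [Char.ofNat (ch.toNat + (k - 1).toNat)] else []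
        | none => []
      out ++ runsB (rest.dropWhile (· == d))
termination_by l => l.length
decreasing_by
  simp only [List.length_cons]
  exact Nat.lt_succ_of_le (List.length_dropWhile_le _ _)

def translate_nokia_alphabet_alt (code : String) : String :=
  String.ofList (runsB code.toList)

-- ===== PRECONDITION & SPEC =====
-- A raises IndexError on the empty string (it reads code[0]); that is the only input excluded (B would return '' there).
def Pre_translate_nokia_alphabet (code : String) : Prop := code ≠ ""
instance (code : String) : Decidable (Pre_translate_nokia_alphabet code) := by
  unfold Pre_translate_nokia_alphabet; infer_instance
def pvWitness_translate_nokia_alphabet : String := "4433555"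

def Spec_translate_nokia_alphabet (code : String) (out : String) : Prop := out = translate_nokia_alphabet_alt code
instance (code : String) (out : String) : Decidable (Spec_translate_nokia_alphabet code out) := by unfold Spec_translate_nokia_alphabet; infer_instance

-- ===== CLAIM (what is proved, stated in full; the proofs are below) =====
def Claim_equal_translate_nokia_alphabet : Prop := ∀ (code : String), Dom_translate_nokia_alphabet code → Pre_translate_nokia_alphabet code → Spec_translate_nokia_alphabet code (translate_nokia_alphabet code)

-- ===== LEMMAS AND PROOFS =====
def strOut (d : Char) (m : Nat) : List Char :=
  match nokiaBase.get? d with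
  | some (ch, cnt) =>
      if (m : Int) ≤ cnt then [Char.ofNat (ch.toNat + ((m : Int) - 1).toNat)] else []
  | none => []
def lookAppend (digit : List Char) : List Char := lookA [] digit

lemma nokiaBase_mk : nokiaBase = PySem.Dict.mk
    [('0', (' ', 1)), ('2', ('a', 3)), ('3', ('d', 3)), ('4', ('g', 3)),
     ('5', ('j', 3)), ('6', ('m', 3)), ('7', ('p', 4)), ('8', ('t', 3)), ('9', ('w', 4))] := rfl

lemma get?_none (d : Char) (h0 : ¬ d = '0') (h2 : ¬ d = '2') (h3 : ¬ d = '3') (h4 : ¬ d = '4')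
    (h5 : ¬ d = '5') (h6 : ¬ d = '6') (h7 : ¬ d = '7') (h8 : ¬ d = '8') (h9 : ¬ d = '9') :
    nokiaBase.get? d = none := by
  rw [nokiaBase_mk]
  simp [PySem.Dict.get?_mk_cons, Ne.symm h0, Ne.symm h2, Ne.symm h3, Ne.symm h4,
    Ne.symm h5, Ne.symm h6, Ne.symm h7, Ne.symm h8, Ne.symm h9]
  rfl

lemma lookAppend_eq_nil (digit : List Char)
    (h : ∀ j ∈ List.range nokiaKeys.length, ¬ (nokiaKeys.getD j [] = digit)) :
    lookAppend digit = [] := by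
  unfold lookAppend lookA
  rw [PySem.List.foldl_append_ite]
  rw [List.filter_eq_nil_iff.mpr (by intro j hj; simpa using h j hj)]
  simp

lemma lookAppend_big (digit : List Char) (h : 5 ≤ digit.length) : lookAppend digit = [] := by
  apply lookAppend_eq_nil
  intro j hj
  simp only [nokiaKeys, List.mem_range, List.length_cons, List.length_nil] at hj
  interval_cases j <;>
    (intro heq; apply_fun List.length at heq; simp [nokiaKeys] at heq; omega)

lemma strOut_big (d : Char) (m : Nat) (h : 5 ≤ m) : strOut d m = [] := by
  unfold strOut
  by_cases h0 : d = '0'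
  · subst h0
    show (if (m:Int) ≤ 1 then [Char.ofNat (' '.toNat + ((m:Int)-1).toNat)] else []) = []
    rw [if_neg (by omega)]
  by_cases h2 : d = '2'
  · subst h2
    show (if (m:Int) ≤ 3 then [Char.ofNat ('a'.toNat + ((m:Int)-1).toNat)] else []) = []
    rw [if_neg (by omega)]
  by_cases h3 : d = '3'
  · subst h3
    show (if (m:Int) ≤ 3 then [Char.ofNat ('d'.toNat + ((m:Int)-1).toNat)] else []) = []
    rw [if_neg (by omega)]
  by_cases h4 : d = '4'
  · subst h4
    show (if (m:Int) ≤ 3 then [Char.ofNat ('g'.toNat + ((m:Int)-1).toNat)] else []) = []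
    rw [if_neg (by omega)]
  by_cases h5 : d = '5'
  · subst h5
    show (if (m:Int) ≤ 3 then [Char.ofNat ('j'.toNat + ((m:Int)-1).toNat)] else []) = []
    rw [if_neg (by omega)]
  by_cases h6 : d = '6'
  · subst h6
    show (if (m:Int) ≤ 3 then [Char.ofNat ('m'.toNat + ((m:Int)-1).toNat)] else []) = []
    rw [if_neg (by omega)]
  by_cases h7 : d = '7'
  · subst h7
    show (if (m:Int) ≤ 4 then [Char.ofNat ('p'.toNat + ((m:Int)-1).toNat)] else []) = []
    rw [if_neg (by omega)]
  by_cases h8 : d = '8'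
  · subst h8
    show (if (m:Int) ≤ 3 then [Char.ofNat ('t'.toNat + ((m:Int)-1).toNat)] else []) = []
    rw [if_neg (by omega)]
  by_cases h9 : d = '9'
  · subst h9
    show (if (m:Int) ≤ 4 then [Char.ofNat ('w'.toNat + ((m:Int)-1).toNat)] else []) = []
    rw [if_neg (by omega)]
  rw [get?_none d h0 h2 h3 h4 h5 h6 h7 h8 h9]

lemma bridge (d : Char) (m : Nat) (hm : 1 ≤ m) :
    lookAppend (List.replicate m d) = strOut d m := by
  rcases Decidable.em (d = '0' ∨ d = '2' ∨ d = '3' ∨ d = '4' ∨ d = '5' ∨ d = '6' ∨ d = '7' ∨ d = '8' ∨ d = '9') with hd | hd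
  · rcases m with _|_|_|_|_|n
    · omega
    · rcases hd with rfl|rfl|rfl|rfl|rfl|rfl|rfl|rfl|rfl <;> decide
    · rcases hd with rfl|rfl|rfl|rfl|rfl|rfl|rfl|rfl|rfl <;> decide
    · rcases hd with rfl|rfl|rfl|rfl|rfl|rfl|rfl|rfl|rfl <;> decide
    · rcases hd with rfl|rfl|rfl|rfl|rfl|rfl|rfl|rfl|rfl <;> decide
    · rw [lookAppend_big _ (by simp), strOut_big _ _ (by omega)]
  · push_neg at hd
    obtain ⟨h0, h2, h3, h4, h5, h6, h7, h8, h9⟩ := hd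
    have hstr : strOut d m = [] := by
      unfold strOut; rw [get?_none d h0 h2 h3 h4 h5 h6 h7 h8 h9]
    rw [hstr]
    apply lookAppend_eq_nil
    intro j hj
    simp only [nokiaKeys, List.mem_range, List.length_cons, List.length_nil] at hj
    interval_cases j <;>
      simp [nokiaKeys, List.eq_replicate_iff, Ne.symm h0, Ne.symm h2, Ne.symm h3, Ne.symm h4,
        Ne.symm h5, Ne.symm h6, Ne.symm h7, Ne.symm h8, Ne.symm h9]

lemma lookA_eq (text digit : List Char) : lookA text digit = text ++ lookAppend digit := by
  unfold lookAppend lookA; simp [PySem.List.foldl_append_ite]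

lemma runsB_cons (d : Char) (rest : List Char) :
    runsB (d :: rest)
      = strOut d (1 + (rest.takeWhile (· == d)).length) ++ runsB (rest.dropWhile (· == d)) := by
  rw [runsB, strOut]; push_cast; rfl

lemma getLastD_rep (d c : Char) (m : Nat) (hm : 1 ≤ m) : (List.replicate m d).getLastD c = d := by
  cases m with
  | zero => omega
  | succ k => simp [List.getLastD_eq_getLast?, List.getLast?_replicate]
def runsAll (d : Char) (m : Nat) (l : List Char) : List Char :=
  strOut d (m + (l.takeWhile (· == d)).length) ++ runsB (l.dropWhile (· == d))

lemma A_run (l : List Char) : ∀ (d : Char) (m : Nat) (text : List Char), 1 ≤ m →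
    (let st := l.foldl stepA (text, List.replicate m d);
     lookA st.1 st.2) = text ++ runsAll d m l := by
  induction l with
  | nil =>
      intro d m text hm
      simp [runsAll, runsB, lookA_eq, bridge d m hm]
  | cons e tl ih =>
      intro d m text hm
      simp only [List.foldl_cons]
      by_cases he : e = d
      · subst he
        have hstep : stepA (text, List.replicate m e) e = (text, List.replicate (m+1) e) := by
          rw [stepA, getLastD_rep e ' ' m hm]
          simp [List.replicate_succ' (n := m)]
        rw [hstep, ih e (m+1) text (by omega)]
        have harg : m + 1 + (tl.takeWhile (· == e)).length
            = m + ((e :: tl).takeWhile (· == e)).length := by simp; omega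
        simp only [runsAll, List.dropWhile_cons, BEq.rfl, harg]
        simp
      · have hstep : stepA (text, List.replicate m d) e
            = (text ++ lookAppend (List.replicate m d), [e]) := by
          rw [stepA, getLastD_rep d ' ' m hm]
          simp [he, lookA_eq]
        rw [hstep, show [e] = List.replicate 1 e from rfl, ih e 1 _ (by omega)]
        have hne : (e == d) = false := by simp [he]
        have h1 : runsAll d m (e :: tl) = strOut d m ++ runsAll e 1 tl := by
          simp only [runsAll, List.takeWhile_cons, List.dropWhile_cons, hne,
            Bool.false_eq_true, if_false, List.length_nil, Nat.add_zero, runsB_cons]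
        rw [h1, bridge d m hm, List.append_assoc]

-- ===== VERDICT (by name: the statement is the Claim_ definition above) =====
theorem translate_nokia_alphabet_spec : Claim_equal_translate_nokia_alphabet := by
  intro code _hdom hpre
  unfold Spec_translate_nokia_alphabet translate_nokia_alphabet translate_nokia_alphabet_alt
  have hne : code.toList ≠ [] := by
    simpa [String.toList_eq_nil_iff] using hpre
  rcases hcl : code.toList with _ | ⟨c, rest⟩
  · exact absurd hcl hne
  · have h := A_run rest c 1 [] (by omega)
    simp only [List.replicate_one] at h
    simp only [h, runsB_cons, runsAll, List.nil_append]
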